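-- pv_equiv track=rewrite | github.com/gymoon10/Coding-Test | 4.이진탐색/6.도약.py | Solve_N3
-- ===== SOURCE A (Python) =====
-- def Solve_N3(N, pos):  # time limit exceed (O(N^3))
-- 	pos.sort()
-- 	cnt = 0
-- 	for s1 in range(N - 2):  # 첫 번째 연잎의 위치
-- 		for s2 in range(s1+1, N-1):  # 두 번째 연잎의 선택 loop
-- 			jump = pos[s2] - pos[s1]
-- 			# rs ~ re가 가능한 범위
-- 			rs = pos[s2] + jump  # 이전에 뛴 거리 이상 뜀
-- 			re = pos[s2] + (2 * jump)  # 단 2배보다 멀리 뛰진 못함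
-- 			for s3 in range(s2+1, N):
-- 				if rs <= pos[s3] <= re:  # 가능 범위에 있는 지 체크
-- 					cnt += 1
-- 				elif pos[s3] > re:
-- 					break
-- 	return cnt
-- ===== SOURCE B (Python) =====
-- def _bisect_left(a, x, lo, hi):
--     while lo < hi:
--         mid = (lo + hi) // 2
--         if a[mid] < x:
--             lo = mid + 1
--         else:
--             hi = mid
--     return lo
--
--
-- def _bisect_right(a, x, lo, hi):
--     while lo < hi:
--         mid = (lo + hi) // 2
--         if x < a[mid]:
--             hi = mid
--         else:
--             lo = mid + 1
--     return lo
--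
--
-- def Solve_N3(N, pos):
--     # like A, sorts pos in place; equivalence is about the return value.
--     pos.sort()
--     total = 0
--     for s1 in range(N - 2):
--         for s2 in range(s1 + 1, N - 1):
--             jump = pos[s2] - pos[s1]
--             total += (_bisect_right(pos, pos[s2] + 2 * jump, s2 + 1, N)
--                       - _bisect_left(pos, pos[s2] + jump, s2 + 1, N))
--     return total
-- ===== Notes on version B (the rewrite author's own statement) =====
-- stated objective: alternative
-- what changed: B replaces A's inner linear scan over s3 (with its early break) by two hand-written binary searches (_bisect_left/_bisect_right with lo=s2+1, hi=N) that count the elements of the sorted array lying in [rs, re].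
import Mathlib
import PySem

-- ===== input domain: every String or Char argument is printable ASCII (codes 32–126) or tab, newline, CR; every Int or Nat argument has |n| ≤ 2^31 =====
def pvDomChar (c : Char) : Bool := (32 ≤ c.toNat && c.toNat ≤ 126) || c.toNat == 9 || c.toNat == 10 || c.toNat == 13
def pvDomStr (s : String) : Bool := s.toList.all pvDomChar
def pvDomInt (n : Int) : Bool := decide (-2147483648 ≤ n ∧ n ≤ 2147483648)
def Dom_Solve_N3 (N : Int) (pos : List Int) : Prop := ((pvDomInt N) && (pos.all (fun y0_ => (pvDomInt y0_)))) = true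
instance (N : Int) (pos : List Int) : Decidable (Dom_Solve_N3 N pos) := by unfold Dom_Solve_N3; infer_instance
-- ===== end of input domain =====

-- B replaces A's inner linear scan over s3 by two hand-written binary searches over pos[s2+1:N]
-- on the sorted array; both Pythons sort `pos` in place (same side effect), the equivalence
-- proved is about the return value.

-- ===== PORT A =====
-- the inner `for s3 in range(s2+1, N)` loop with its break, over the list of indices
def innerA (a : List Int) (rs re : Int) : List Int → Int → Int
  | [], cnt => cnt
  | s3 :: rest, cnt =>
    let v := PySem.List.pyGetD a s3 0
    if rs ≤ v ∧ v ≤ re then innerA a rs re rest (cnt + 1)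
    else if re < v then cnt          -- `elif pos[s3] > re: break`
    else innerA a rs re rest cnt

def Solve_N3 (N : Int) (pos : List Int) : Int :=
  let a := PySem.List.sorted pos (fun x => x) false
  (PySem.List.pyRange 0 (N - 2) 1).foldl (fun cnt s1 =>
    (PySem.List.pyRange (s1 + 1) (N - 1) 1).foldl (fun cnt s2 =>
      let jump := PySem.List.pyGetD a s2 0 - PySem.List.pyGetD a s1 0
      let rs := PySem.List.pyGetD a s2 0 + jump
      let re := PySem.List.pyGetD a s2 0 + 2 * jump
      innerA a rs re (PySem.List.pyRange (s2 + 1) N 1) cnt) cnt) 0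

-- ===== PORT B =====
-- hand-written `_bisect_left(a, x, lo, hi)` (Python ints throughout; `//` is floordiv)
def blAux (a : List Int) (x : Int) (lo hi : Int) : Int :=
  if h : lo < hi then
    let mid := PySem.Int.floordiv (lo + hi) 2
    if PySem.List.pyGetD a mid 0 < x then blAux a x (mid + 1) hi
    else blAux a x lo mid
  else lo
termination_by (hi - lo).toNat
decreasing_by
  all_goals
    have hub : PySem.Int.floordiv (lo + hi) 2 < hi :=
      (PySem.Int.floordiv_lt_iff_lt_mul (by omega)).mpr (by omega)
    have hlb := (PySem.Int.floordiv_two_mid_bounds (le_of_lt h)).1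
    omega

-- hand-written `_bisect_right(a, x, lo, hi)`
def brAux (a : List Int) (x : Int) (lo hi : Int) : Int :=
  if h : lo < hi then
    let mid := PySem.Int.floordiv (lo + hi) 2
    if x < PySem.List.pyGetD a mid 0 then brAux a x lo mid
    else brAux a x (mid + 1) hi
  else lo
termination_by (hi - lo).toNat
decreasing_by
  all_goals
    have hub : PySem.Int.floordiv (lo + hi) 2 < hi :=
      (PySem.Int.floordiv_lt_iff_lt_mul (by omega)).mpr (by omega)
    have hlb := (PySem.Int.floordiv_two_mid_bounds (le_of_lt h)).1
    omega

def Solve_N3_alt (N : Int) (pos : List Int) : Int :=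
  let a := PySem.List.sorted pos (fun x => x) false
  (PySem.List.pyRange 0 (N - 2) 1).foldl (fun total s1 =>
    (PySem.List.pyRange (s1 + 1) (N - 1) 1).foldl (fun total s2 =>
      let jump := PySem.List.pyGetD a s2 0 - PySem.List.pyGetD a s1 0
      total + (brAux a (PySem.List.pyGetD a s2 0 + 2 * jump) (s2 + 1) N
               - blAux a (PySem.List.pyGetD a s2 0 + jump) (s2 + 1) N)) total) 0


-- exactly the inputs on which A returns: when 3 ≤ N and pos has fewer than N elements,
-- A always hits an out-of-range pos[...] and raises IndexError
def Pre_Solve_N3 (N : Int) (pos : List Int) : Prop := N ≤ (pos.length : Int) ∨ N ≤ 2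
instance (N : Int) (pos : List Int) : Decidable (Pre_Solve_N3 N pos) := by
  unfold Pre_Solve_N3; infer_instance

def pvWitness_Solve_N3 : Int × List Int := (5, [1, 2, 4, 7, 9])

def Spec_Solve_N3 (N : Int) (pos : List Int) (out : Int) : Prop := out = Solve_N3_alt N pos
instance (N : Int) (pos : List Int) (out : Int) : Decidable (Spec_Solve_N3 N pos out) := by
  unfold Spec_Solve_N3; infer_instance

-- ===== CLAIM (what is proved, stated in full; the proofs are below) =====
def Claim_equal_Solve_N3 : Prop := ∀ (N : Int) (pos : List Int), Dom_Solve_N3 N pos → Pre_Solve_N3 N pos → Spec_Solve_N3 N pos (Solve_N3 N pos)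

-- ===== LEMMAS AND PROOFS =====

-- the contiguous segment a[lo:hi] (Nat bounds)
def pvSeg (a : List Int) (lo hi : Nat) : List Int := (a.drop lo).take (hi - lo)

lemma pvSeg_nil (a : List Int) (lo hi : Nat) (h : hi ≤ lo) : pvSeg a lo hi = [] := by
  simp [pvSeg, Nat.sub_eq_zero_of_le h]

lemma pvSeg_cons (a : List Int) (lo hi : Nat) (h1 : lo < hi) (h2 : lo < a.length) :
    pvSeg a lo hi = a[lo] :: pvSeg a (lo + 1) hi := by
  unfold pvSeg
  rw [List.drop_eq_getElem_cons h2]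
  have : hi - lo = (hi - (lo + 1)) + 1 := by omega
  rw [this, List.take_succ_cons]

lemma pvSeg_split (a : List Int) (lo mid hi : Nat) (h1 : lo ≤ mid) (h2 : mid ≤ hi) :
    pvSeg a lo hi = pvSeg a lo mid ++ pvSeg a mid hi := by
  unfold pvSeg
  have h3 : hi - lo = (mid - lo) + (hi - mid) := by omega
  rw [h3, List.take_add, List.drop_drop]
  have h4 : lo + (mid - lo) = mid := by omega
  rw [h4]

lemma pvSeg_length (a : List Int) (lo hi : Nat) (_h1 : lo ≤ hi) (h2 : hi ≤ a.length) :
    (pvSeg a lo hi).length = hi - lo := by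
  simp [pvSeg]; omega

lemma pvSeg_mem (a : List Int) (lo hi : Nat) (v : Int) (hv : v ∈ pvSeg a lo hi) :
    ∃ j, lo ≤ j ∧ j < hi ∧ ∃ hj : j < a.length, v = a[j] := by
  unfold pvSeg at hv
  rw [List.mem_iff_getElem] at hv
  obtain ⟨k, hk, hkv⟩ := hv
  have hk1 : k < hi - lo := lt_of_lt_of_le hk (by simp [List.length_take])
  have hk2 : lo + k < a.length := by
    have := hk; simp [List.length_take, List.length_drop] at this; omega
  refine ⟨lo + k, by omega, by omega, hk2, ?_⟩
  rw [← hkv, List.getElem_take, List.getElem_drop]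

lemma pvSorted_mono (a : List Int) (hs : a.Pairwise (· ≤ ·)) (i j : Nat) (hij : i ≤ j)
    (hj : j < a.length) : a[i]'(by omega) ≤ a[j] := by
  rcases Nat.lt_or_ge i j with h | h
  · exact List.pairwise_iff_getElem.mp hs i j (by omega) hj h
  · have : i = j := by omega
    subst this; rfl

-- count over a segment where every element satisfies p
lemma pvSeg_countP_all (a : List Int) (p : Int → Bool) (lo hi : Nat) (h1 : lo ≤ hi)
    (h2 : hi ≤ a.length) (hall : ∀ j, lo ≤ j → j < hi → ∀ hj : j < a.length, p a[j]) :
    (pvSeg a lo hi).countP p = hi - lo := by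
  rw [List.countP_eq_length.mpr, pvSeg_length a lo hi h1 h2]
  intro v hv
  obtain ⟨j, hj1, hj2, hj3, hj4⟩ := pvSeg_mem a lo hi v hv
  subst hj4; exact hall j hj1 hj2 hj3

lemma pvSeg_countP_none (a : List Int) (p : Int → Bool) (lo hi : Nat)
    (hnone : ∀ j, lo ≤ j → j < hi → ∀ hj : j < a.length, ¬ p a[j]) :
    (pvSeg a lo hi).countP p = 0 := by
  rw [List.countP_eq_zero]
  intro v hv
  obtain ⟨j, hj1, hj2, hj3, hj4⟩ := pvSeg_mem a lo hi v hv
  subst hj4; exact hnone j hj1 hj2 hj3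

-- _bisect_left returns lo + #{j in [lo,hi) | a[j] < x} on a sorted a
lemma blAux_eq (a : List Int) (hs : a.Pairwise (· ≤ ·)) (x : Int) (lo hi : Int)
    (h0 : 0 ≤ lo) (h1 : lo ≤ hi) (h2 : hi ≤ (a.length : Int)) :
    blAux a x lo hi = lo + ((pvSeg a lo.toNat hi.toNat).countP (fun v => decide (v < x)) : Int) := by
  revert h0 h1 h2
  fun_induction blAux a x lo hi with
  | case1 lo hi h mid hlt ih =>
    intro h0 h1 h2
    have hm : mid = PySem.Int.floordiv (lo + hi) 2 := rfl
    have hub : mid < hi := hm ▸ (PySem.Int.floordiv_lt_iff_lt_mul (by omega)).mpr (by omega)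
    have hlb : lo ≤ mid := hm ▸ (PySem.Int.floordiv_two_mid_bounds (le_of_lt h)).1
    have hmlen : mid.toNat < a.length := by omega
    rw [PySem.List.pyGetD_eq_getElem _ _ (by omega) (by omega)] at hlt
    rw [ih (by omega) (by omega) h2,
      pvSeg_split a lo.toNat (mid + 1).toNat hi.toNat (by omega) (by omega),
      List.countP_append,
      pvSeg_countP_all a _ lo.toNat (mid + 1).toNat (by omega) (by omega) ?_]
    · push_cast
      omega
    · intro j hj1 hj2 hj
      have hmono := pvSorted_mono a hs j mid.toNat (by omega) hmlen
      simp only [decide_eq_true_eq]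
      exact lt_of_le_of_lt hmono hlt
  | case2 lo hi h mid hge ih =>
    intro h0 h1 h2
    have hm : mid = PySem.Int.floordiv (lo + hi) 2 := rfl
    have hub : mid < hi := hm ▸ (PySem.Int.floordiv_lt_iff_lt_mul (by omega)).mpr (by omega)
    have hlb : lo ≤ mid := hm ▸ (PySem.Int.floordiv_two_mid_bounds (le_of_lt h)).1
    have hmlen : mid.toNat < a.length := by omega
    rw [PySem.List.pyGetD_eq_getElem _ _ (by omega) (by omega)] at hge
    have hax : x ≤ a[mid.toNat] := not_lt.mp hge
    rw [ih (by omega) (by omega) (by omega),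
      pvSeg_split a lo.toNat mid.toNat hi.toNat (by omega) (by omega),
      List.countP_append,
      pvSeg_countP_none a _ mid.toNat hi.toNat ?_]
    · omega
    · intro j hj1 hj2 hj
      have hmono := pvSorted_mono a hs mid.toNat j hj1 hj
      simp only [decide_eq_true_eq, not_lt]
      exact le_trans hax hmono
  | case3 lo hi h =>
    intro h0 h1 h2
    rw [pvSeg_nil a lo.toNat hi.toNat (by omega)]
    simp

-- _bisect_right returns lo + #{j in [lo,hi) | a[j] ≤ x} on a sorted a
lemma brAux_eq (a : List Int) (hs : a.Pairwise (· ≤ ·)) (x : Int) (lo hi : Int)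
    (h0 : 0 ≤ lo) (h1 : lo ≤ hi) (h2 : hi ≤ (a.length : Int)) :
    brAux a x lo hi = lo + ((pvSeg a lo.toNat hi.toNat).countP (fun v => decide (v ≤ x)) : Int) := by
  revert h0 h1 h2
  fun_induction brAux a x lo hi with
  | case1 lo hi h mid hlt ih =>
    intro h0 h1 h2
    have hm : mid = PySem.Int.floordiv (lo + hi) 2 := rfl
    have hub : mid < hi := hm ▸ (PySem.Int.floordiv_lt_iff_lt_mul (by omega)).mpr (by omega)
    have hlb : lo ≤ mid := hm ▸ (PySem.Int.floordiv_two_mid_bounds (le_of_lt h)).1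
    have hmlen : mid.toNat < a.length := by omega
    rw [PySem.List.pyGetD_eq_getElem _ _ (by omega) (by omega)] at hlt
    rw [ih (by omega) (by omega) (by omega),
      pvSeg_split a lo.toNat mid.toNat hi.toNat (by omega) (by omega),
      List.countP_append,
      pvSeg_countP_none a _ mid.toNat hi.toNat ?_]
    · omega
    · intro j hj1 hj2 hj
      have hmono := pvSorted_mono a hs mid.toNat j hj1 hj
      simp only [decide_eq_true_eq, not_le]
      exact lt_of_lt_of_le hlt hmono
  | case2 lo hi h mid hge ih =>
    intro h0 h1 h2
    have hm : mid = PySem.Int.floordiv (lo + hi) 2 := rfl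
    have hub : mid < hi := hm ▸ (PySem.Int.floordiv_lt_iff_lt_mul (by omega)).mpr (by omega)
    have hlb : lo ≤ mid := hm ▸ (PySem.Int.floordiv_two_mid_bounds (le_of_lt h)).1
    have hmlen : mid.toNat < a.length := by omega
    rw [PySem.List.pyGetD_eq_getElem _ _ (by omega) (by omega)] at hge
    have hax : a[mid.toNat] ≤ x := not_lt.mp hge
    rw [ih (by omega) (by omega) h2,
      pvSeg_split a lo.toNat (mid + 1).toNat hi.toNat (by omega) (by omega),
      List.countP_append,
      pvSeg_countP_all a _ lo.toNat (mid + 1).toNat (by omega) (by omega) ?_]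
    · push_cast
      omega
    · intro j hj1 hj2 hj
      have hmono := pvSorted_mono a hs j mid.toNat (by omega) hmlen
      simp only [decide_eq_true_eq]
      exact le_trans hmono hax
  | case3 lo hi h =>
    intro h0 h1 h2
    rw [pvSeg_nil a lo.toNat hi.toNat (by omega)]
    simp

-- A's break loop counts the in-window elements of the (sorted) segment
lemma innerA_eq (a : List Int) (hs : a.Pairwise (· ≤ ·)) (rs re : Int) (N k : Int) (cnt : Int)
    (hk : 0 ≤ k) (hN : N ≤ (a.length : Int)) :
    innerA a rs re (PySem.List.pyRange k N 1) cnt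
      = cnt + ((pvSeg a k.toNat N.toNat).countP (fun v => decide (rs ≤ v) && decide (v ≤ re)) : Int) := by
  generalize hn : (N - k).toNat = n
  induction n generalizing k cnt with
  | zero =>
    rw [PySem.List.pyRange_one_eq_nil (by omega), pvSeg_nil a _ _ (by omega)]
    simp [innerA]
  | succ n ih =>
    have hkN : k < N := by omega
    have hklen : k.toNat < a.length := by omega
    rw [PySem.List.pyRange_one_cons hkN]
    have hv : PySem.List.pyGetD a k 0 = a[k.toNat] :=
      PySem.List.pyGetD_eq_getElem _ _ hk (by omega)
    have hseg : pvSeg a k.toNat N.toNat = a[k.toNat] :: pvSeg a (k.toNat + 1) N.toNat :=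
      pvSeg_cons a _ _ (by omega) hklen
    have htn : (k + 1).toNat = k.toNat + 1 := by omega
    simp only [innerA, hv]
    split_ifs with hin hbr
    · rw [ih (k + 1) (cnt + 1) (by omega) (by omega), htn, hseg, List.countP_cons]
      simp only [hin.1, hin.2, decide_true, Bool.and_self]
      push_cast
      ring
    · -- break: a[k] > re, so every later element is > re as well
      rw [hseg, List.countP_cons,
        pvSeg_countP_none a _ (k.toNat + 1) N.toNat ?_]
      · simp [not_le.mpr hbr]
      · intro j hj1 hj2 hj
        have hmono := pvSorted_mono a hs k.toNat j (by omega) hj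
        simp only [Bool.and_eq_true, decide_eq_true_eq, not_and]
        intro _
        omega
    · rw [ih (k + 1) cnt (by omega) (by omega), htn, hseg, List.countP_cons]
      have : (decide (rs ≤ a[k.toNat]) && decide (a[k.toNat] ≤ re)) = false := by
        rcases Decidable.not_and_iff_not_or_not.mp hin with h | h <;> simp [h]
      rw [this]
      simp

-- counting a window = counting (≤ re) minus counting (< rs), when rs ≤ re
lemma pvCount_window (l : List Int) (rs re : Int) (h : rs ≤ re) :
    (l.countP (fun v => decide (v ≤ re)) : Int) - (l.countP (fun v => decide (v < rs)) : Int)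
      = (l.countP (fun v => decide (rs ≤ v) && decide (v ≤ re)) : Int) := by
  induction l with
  | nil => simp
  | cons v t ih =>
    simp only [List.countP_cons]
    by_cases h1 : v ≤ re <;> by_cases h2 : v < rs <;>
      simp [h1, h2, not_lt.mp] <;> omega

-- ===== VERDICT (by name: the statement is the Claim_ definition above) =====
theorem Solve_N3_spec : Claim_equal_Solve_N3 := by
  intro N pos _ hpre
  unfold Spec_Solve_N3 Solve_N3 Solve_N3_alt
  simp only []
  by_cases hN2 : N ≤ 2
  · rw [PySem.List.pyRange_one_eq_nil (by omega : N - 2 ≤ 0)]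
    simp
  · have hNlen : N ≤ ((PySem.List.sorted pos (fun x => x) false).length : Int) := by
      rw [PySem.List.length_sorted]
      rcases hpre with h | h
      · exact h
      · omega
    set a := PySem.List.sorted pos (fun x => x) false with ha
    have hs : a.Pairwise (· ≤ ·) := PySem.List.sorted_pairwise pos (fun x => x)
    apply PySem.List.foldl_congr_mem
    intro acc s1 hmem1
    apply PySem.List.foldl_congr_mem
    intro acc2 s2 hmem2
    rw [PySem.List.mem_pyRange_one] at hmem1 hmem2
    have hs1len : s1.toNat < a.length := by omega
    have hs2len : s2.toNat < a.length := by omega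
    have hv1 : PySem.List.pyGetD a s1 0 = a[s1.toNat] :=
      PySem.List.pyGetD_eq_getElem _ _ (by omega) (by omega)
    have hv2 : PySem.List.pyGetD a s2 0 = a[s2.toNat] :=
      PySem.List.pyGetD_eq_getElem _ _ (by omega) (by omega)
    have hjump : 0 ≤ a[s2.toNat] - a[s1.toNat] := by
      have := pvSorted_mono a hs s1.toNat s2.toNat (by omega) hs2len
      omega
    -- rs ≤ re since the jump is nonnegative on the sorted array
    have hw := pvCount_window (pvSeg a (s2 + 1).toNat N.toNat)
      (PySem.List.pyGetD a s2 0 + (PySem.List.pyGetD a s2 0 - PySem.List.pyGetD a s1 0))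
      (PySem.List.pyGetD a s2 0 + 2 * (PySem.List.pyGetD a s2 0 - PySem.List.pyGetD a s1 0))
      (by rw [hv1, hv2]; omega)
    rw [innerA_eq a hs _ _ N (s2 + 1) acc2 (by omega) hNlen,
      blAux_eq a hs _ (s2 + 1) N (by omega) (by omega) hNlen,
      brAux_eq a hs _ (s2 + 1) N (by omega) (by omega) hNlen]
    omega
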